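-- pv_equiv track=rewrite | github.com/LucasSantana-Dev/mcp-gateway | tool_router/ai/prompt_architect.py | _add_specificity
-- ===== SOURCE A (Python) =====
-- def _add_specificity(prompt: str) -> str:
--     """Add specificity to vague statements."""
--     # Replace vague terms with specific ones
--     replacements = {
--         "good": "high-quality, maintainable",
--         "nice": "well-structured, clean",
--         "better": "more efficient, optimized",
--         "proper": "following best practices",
--         "simple": "minimal, easy to understand",
--     }
--
--     for vague, specific in replacements.items():
--         prompt = prompt.replace(vague, specific)
--
--     return prompt
-- ===== SOURCE B (Python) =====
-- import re
--
-- _REPLACEMENTS = {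
--     "good": "high-quality, maintainable",
--     "nice": "well-structured, clean",
--     "better": "more efficient, optimized",
--     "proper": "following best practices",
--     "simple": "minimal, easy to understand",
-- }
--
-- _PATTERN = re.compile("|".join(re.escape(k) for k in _REPLACEMENTS))
--
--
-- def _add_specificity(prompt: str) -> str:
--     """Add specificity to vague statements (single regex pass)."""
--     return _PATTERN.sub(lambda m: _REPLACEMENTS[m.group(0)], prompt)
-- ===== Notes on version B (the rewrite author's own statement) =====
-- stated objective: alternative
-- what changed: B performs a single left-to-right pass with one compiled regex alternation over the five vague keys (callback dict lookup), instead of A's five sequential full-string str.replace passes.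
-- intended difference: On prompts containing the substring 'properimple', A's fourth pass inserts a replacement whose trailing letter fuses with the following letters into a new occurrence of the fifth key, which A's last pass then rewrites as well; B substitutes only the original vague words, the intended behaviour of a word-substitution table. — e.g. on _add_specificity("properimple"): A returns "following best practiceminimal, easy to understand", B returns "following best practicesimple"
import Mathlib
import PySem

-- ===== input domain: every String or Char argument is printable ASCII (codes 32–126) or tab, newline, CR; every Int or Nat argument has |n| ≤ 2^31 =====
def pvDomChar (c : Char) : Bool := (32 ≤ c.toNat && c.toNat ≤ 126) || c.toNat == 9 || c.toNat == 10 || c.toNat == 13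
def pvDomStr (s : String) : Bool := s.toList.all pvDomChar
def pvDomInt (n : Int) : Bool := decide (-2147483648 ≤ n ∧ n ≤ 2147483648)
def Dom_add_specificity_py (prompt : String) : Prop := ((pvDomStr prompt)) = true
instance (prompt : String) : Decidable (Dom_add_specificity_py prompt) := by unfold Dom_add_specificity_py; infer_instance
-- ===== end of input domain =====

-- B replaces A's five sequential str.replace passes with a single left-to-right scan
-- (one regex alternation pass in Python); on prompts containing "properimple" A's fourth
-- pass cascades into the fifth and B returns the intended uncascaded text instead.

-- ===== PORT A =====
def add_specificity_py (prompt : String) : String :=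
  let replacements : PySem.Dict String String :=
    ⟨[("good", "high-quality, maintainable"),
      ("nice", "well-structured, clean"),
      ("better", "more efficient, optimized"),
      ("proper", "following best practices"),
      ("simple", "minimal, easy to understand")]⟩
  replacements.items.foldl (fun p kv => PySem.Str.replace p kv.1 kv.2) prompt

-- ===== PORT B =====
-- the alternation pattern: the five keys in dict order, each with its replacement
def pvAltTable : List (List Char × List Char) :=
  [("good".toList, "high-quality, maintainable".toList),
   ("nice".toList, "well-structured, clean".toList),
   ("better".toList, "more efficient, optimized".toList),
   ("proper".toList, "following best practices".toList),
   ("simple".toList, "minimal, easy to understand".toList)]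

-- re.sub with the alternation: single scan; at each position the first alternative that
-- matches is substituted via the dict-lookup callback, otherwise the character is copied
def pvAltScan : List Char → List Char
  | [] => []
  | c :: t =>
    match pvAltTable.find? (fun kv => kv.1.isPrefixOf (c :: t)) with
    | some kv => kv.2 ++ pvAltScan (t.drop (kv.1.length - 1))
    | none => c :: pvAltScan t
termination_by l => l.length
decreasing_by all_goals simp

def add_specificity_py_alt (prompt : String) : String := String.ofList (pvAltScan prompt.toList)

-- ===== PRECONDITION & SPEC =====
-- On prompts containing the substring "properimple", A's fourth pass inserts a replacement
-- whose trailing letter fuses with the following letters into a new occurrence of the fifth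
-- key, which A's last pass then rewrites as well; B substitutes only the original vague
-- words, the intended behaviour of a word-substitution table.
def D_add_specificity_py (prompt : String) : Prop := PySem.Str.isIn "properimple" prompt = true
instance (prompt : String) : Decidable (D_add_specificity_py prompt) := by unfold D_add_specificity_py; infer_instance

def Spec_add_specificity_py (prompt : String) (out : String) : Prop := ¬ D_add_specificity_py prompt → out = add_specificity_py_alt prompt
instance (prompt : String) (out : String) : Decidable (Spec_add_specificity_py prompt out) := by unfold Spec_add_specificity_py; infer_instance

def pvDiffWitness_add_specificity_py : String := "properimple"
def pvDiffWitnessOut_add_specificity_py : String × String :=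
  ("following best practiceminimal, easy to understand", "following best practicesimple")

-- ===== CLAIM (what is proved, stated in full; the proofs are below) =====
def Claim_unchanged_add_specificity_py : Prop := ∀ (prompt : String), Dom_add_specificity_py prompt → Spec_add_specificity_py prompt (add_specificity_py prompt)
def Claim_exact_add_specificity_py : Prop := ∀ (prompt : String), Dom_add_specificity_py prompt → D_add_specificity_py prompt → add_specificity_py prompt ≠ add_specificity_py_alt prompt
def Claim_changed_add_specificity_py : Prop := Dom_add_specificity_py (pvDiffWitness_add_specificity_py) ∧ D_add_specificity_py (pvDiffWitness_add_specificity_py) ∧ add_specificity_py (pvDiffWitness_add_specificity_py) = pvDiffWitnessOut_add_specificity_py.1 ∧ add_specificity_py_alt (pvDiffWitness_add_specificity_py) = pvDiffWitnessOut_add_specificity_py.2 ∧ pvDiffWitnessOut_add_specificity_py.1 ≠ pvDiffWitnessOut_add_specificity_py.2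

-- ===== LEMMAS AND PROOFS =====

-- proof-side model of Python's str.replace with a nonempty needle c0 :: kt
def pvRep (c0 : Char) (kt v : List Char) : List Char → List Char
  | [] => []
  | c :: t =>
    if (c0 :: kt).isPrefixOf (c :: t) then v ++ pvRep c0 kt v (t.drop kt.length)
    else c :: pvRep c0 kt v t
termination_by l => l.length
decreasing_by all_goals simp

lemma pvRep_match (c0 : Char) (kt v l : List Char) (h : (c0 :: kt) <+: l) :
    pvRep c0 kt v l = v ++ pvRep c0 kt v (l.drop (kt.length + 1)) := by
  match l with
  | [] => exact absurd (List.eq_nil_of_prefix_nil h) (by simp)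
  | c :: t =>
    rw [pvRep, if_pos (List.isPrefixOf_iff_prefix.mpr h)]
    simp [List.drop_succ_cons]

lemma pvRep_nomatch (c0 : Char) (kt v : List Char) (c : Char) (t : List Char)
    (h : ¬ (c0 :: kt) <+: (c :: t)) :
    pvRep c0 kt v (c :: t) = c :: pvRep c0 kt v t := by
  rw [pvRep, if_neg (fun hb => h (List.isPrefixOf_iff_prefix.mp hb))]

lemma pv_go_eq (c0 : Char) (kt v : List Char) :
    ∀ (fuel : Nat) (l acc : List Char), l.length ≤ fuel →
      PySem.Chars.replace.go (c0 :: kt) v fuel l acc = acc.reverse ++ pvRep c0 kt v l := by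
  intro fuel
  induction fuel with
  | zero =>
    intro l acc hl
    have : l = [] := by cases l <;> simp_all
    subst this
    rw [PySem.Chars.replace.go]; simp [pvRep]
  | succ n ih =>
    intro l acc hl
    match l with
    | [] => rw [PySem.Chars.replace.go]; simp [pvRep]; omega
    | c :: t =>
      rw [PySem.Chars.replace.go]
      by_cases hp : (c0 :: kt).isPrefixOf (c :: t)
      · rw [if_pos hp, pvRep, if_pos hp]
        have hpre := List.isPrefixOf_iff_prefix.mp hp
        have hlen : (c0 :: kt).length ≤ (c :: t).length := hpre.length_le
        rw [show List.drop (c0 :: kt).length (c :: t) = t.drop kt.length from by simp]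
        rw [ih (t.drop kt.length) (v.reverse ++ acc) (by simp at hl ⊢; omega)]
        simp
      · rw [if_neg hp, pvRep, if_neg hp]
        rw [ih t (c :: acc) (by simp at hl ⊢; omega)]
        simp

lemma pv_replace_eq (c0 : Char) (kt v l : List Char) :
    PySem.Chars.replace l (c0 :: kt) v = pvRep c0 kt v l := by
  rw [PySem.Chars.replace]
  simp [pv_go_eq c0 kt v l.length l [] le_rfl]

lemma pv_prefix_append_cases {k u x : List Char} (h : k <+: u ++ x) : k <+: u ∨ u <+: k := by
  by_cases hl : k.length ≤ u.length
  · left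
    have hk := List.prefix_iff_eq_take.mp h
    rw [List.take_append_of_le_length hl] at hk
    exact List.prefix_iff_eq_take.mpr hk
  · right
    obtain ⟨r, hr⟩ := h
    have h1 : u = List.take u.length (u ++ x) := by simp
    rw [← hr, List.take_append_of_le_length (by omega)] at h1
    exact List.prefix_iff_eq_take.mpr h1

-- pvRep passes over a block u at whose positions the needle cannot start in u ++ x
lemma pvDistr2 (c0 : Char) (kt v u x : List Char)
    (hu : ∀ j < u.length, ¬ (c0 :: kt) <+: u.drop j ++ x) :
    pvRep c0 kt v (u ++ x) = u ++ pvRep c0 kt v x := by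
  induction u with
  | nil => rfl
  | cons a u' ih =>
    have h0 := hu 0 (by simp)
    rw [List.cons_append, pvRep_nomatch c0 kt v a (u' ++ x) (by simpa using h0),
        ih (fun j hj => by simpa using hu (j + 1) (by simpa using Nat.succ_lt_succ hj))]
    rfl

-- pvRep passes over a block u in which the needle neither occurs nor starts (any x)
lemma pvDistr (c0 : Char) (kt v u : List Char)
    (hu : ∀ j < u.length, ¬ (c0 :: kt) <+: u.drop j ∧ ¬ u.drop j <+: (c0 :: kt)) :
    ∀ x, pvRep c0 kt v (u ++ x) = u ++ pvRep c0 kt v x := by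
  intro x
  apply pvDistr2
  intro j hj hcon
  rcases pv_prefix_append_cases hcon with h | h
  · exact (hu j hj).1 h
  · exact (hu j hj).2 h

lemma pvNoCreateAux (c0 : Char) (kt v k' : List Char)
    (hlen : k'.length < v.length)
    (hv : ∀ j < k'.length, ¬ k'.drop j <+: v) :
    ∀ (n : Nat) (y : List Char), y.length ≤ n → ∀ q, q ≠ [] → q <:+ k' →
      q <+: pvRep c0 kt v y → q <+: y := by
  intro n
  induction n with
  | zero =>
    intro y hy q hq _ hpre
    have : y = [] := by cases y <;> simp_all
    subst this
    rw [pvRep] at hpre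
    exact absurd (List.eq_nil_of_prefix_nil hpre) hq
  | succ n ih =>
    intro y hy q hq hsuf hpre
    match y with
    | [] =>
      rw [pvRep] at hpre
      exact absurd (List.eq_nil_of_prefix_nil hpre) hq
    | c :: t =>
      by_cases hp : (c0 :: kt).isPrefixOf (c :: t)
      · rw [pvRep, if_pos hp] at hpre
        exfalso
        rcases pv_prefix_append_cases hpre with h | h
        · obtain ⟨p, hp'⟩ := hsuf
          have hj : q = k'.drop p.length := by rw [← hp']; simp
          have hjlt : p.length < k'.length := by
            have := congrArg List.length hp'
            simp at this
            cases q with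
            | nil => exact absurd rfl hq
            | cons _ _ => simp at this; omega
          exact hv p.length hjlt (hj ▸ h)
        · have h1 := h.length_le
          have h2 : q.length ≤ k'.length := hsuf.length_le
          omega
      · rw [pvRep, if_neg hp] at hpre
        match q with
        | [] => exact absurd rfl hq
        | q0 :: q' =>
          rw [List.cons_prefix_cons] at hpre
          obtain ⟨rfl, hq'⟩ := hpre
          by_cases hq'nil : q' = []
          · subst hq'nil
            exact List.cons_prefix_cons.mpr ⟨rfl, List.nil_prefix⟩
          · have hsuf' : q' <:+ k' := (List.suffix_cons q0 q').trans hsuf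
            have := ih t (by simp at hy ⊢; omega) q' hq'nil hsuf' hq'
            exact List.cons_prefix_cons.mpr ⟨rfl, this⟩

-- pvRep cannot create a new occurrence of k' at the head of its output
lemma pvNoCreate (c0 : Char) (kt v k' : List Char)
    (hlen : k'.length < v.length)
    (hv : ∀ j < k'.length, ¬ k'.drop j <+: v)
    (hk : k' ≠ []) :
    ∀ y, k' <+: pvRep c0 kt v y → k' <+: y := fun y =>
  pvNoCreateAux c0 kt v k' hlen hv y.length y le_rfl k' hk (List.suffix_refl _)

-- the "simple" pass over the inserted "proper" value: safe unless "imple" follows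
lemma pvDistrV4 (z : List Char) (h : ¬ "imple".toList <+: z) :
    pvRep 's' "imple".toList "minimal, easy to understand".toList
        ("following best practices".toList ++ z)
      = "following best practices".toList ++
        pvRep 's' "imple".toList "minimal, easy to understand".toList z := by
  apply pvDistr2
  intro j hj hcon
  rcases pv_prefix_append_cases hcon with hA | hB
  · exact (by decide : ∀ j < ("following best practices".toList).length,
      ¬ ('s' :: "imple".toList) <+: ("following best practices".toList).drop j) j hj hA
  · have he : ("following best practices".toList).drop j = ['s'] :=
      (by decide : ∀ j < ("following best practices".toList).length,
        ("following best practices".toList).drop j <+: ('s' :: "imple".toList) →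
          ("following best practices".toList).drop j = ['s']) j hj hB
    rw [he] at hcon
    exact h (List.cons_prefix_cons.mp hcon).2

-- the composition of A's five passes, on char lists
def pvA (l : List Char) : List Char :=
  pvRep 's' "imple".toList "minimal, easy to understand".toList
    (pvRep 'p' "roper".toList "following best practices".toList
      (pvRep 'b' "etter".toList "more efficient, optimized".toList
        (pvRep 'n' "ice".toList "well-structured, clean".toList
          (pvRep 'g' "ood".toList "high-quality, maintainable".toList l))))

lemma pvA_case1 (x : List Char) :
    pvA ("good".toList ++ x) = "high-quality, maintainable".toList ++ pvA x := by
  unfold pvA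
  rw [pvRep_match 'g' "ood".toList _ ("good".toList ++ x) ⟨x, rfl⟩,
      show ("good".toList ++ x).drop ("ood".toList.length + 1) = x from by
        rw [show ("ood".toList.length + 1) = List.length "good".toList by decide]
        exact List.drop_left,
      pvDistr 'n' _ _ _ (by decide),
      pvDistr 'b' _ _ _ (by decide),
      pvDistr 'p' _ _ _ (by decide),
      pvDistr 's' _ _ _ (by decide)]

lemma pvA_case2 (x : List Char) :
    pvA ("nice".toList ++ x) = "well-structured, clean".toList ++ pvA x := by
  unfold pvA
  rw [pvDistr 'g' "ood".toList _ "nice".toList (by decide),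
      pvRep_match 'n' "ice".toList _ ("nice".toList ++ _) ⟨_, rfl⟩,
      show ∀ z : List Char, ("nice".toList ++ z).drop ("ice".toList.length + 1) = z from fun z => by
        rw [show ("ice".toList.length + 1) = List.length "nice".toList by decide]
        exact List.drop_left,
      pvDistr 'b' _ _ _ (by decide),
      pvDistr 'p' _ _ _ (by decide),
      pvDistr 's' _ _ _ (by decide)]

lemma pvA_case3 (x : List Char) :
    pvA ("better".toList ++ x) = "more efficient, optimized".toList ++ pvA x := by
  unfold pvA
  rw [pvDistr 'g' "ood".toList _ "better".toList (by decide),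
      pvDistr 'n' "ice".toList _ "better".toList (by decide),
      pvRep_match 'b' "etter".toList _ ("better".toList ++ _) ⟨_, rfl⟩,
      show ∀ z : List Char, ("better".toList ++ z).drop ("etter".toList.length + 1) = z from fun z => by
        rw [show ("etter".toList.length + 1) = List.length "better".toList by decide]
        exact List.drop_left,
      pvDistr 'p' _ _ _ (by decide),
      pvDistr 's' _ _ _ (by decide)]

lemma pvA_case4 (x : List Char) (hx : ¬ "imple".toList <+: x) :
    pvA ("proper".toList ++ x) = "following best practices".toList ++ pvA x := by
  unfold pvA
  rw [pvDistr 'g' "ood".toList _ "proper".toList (by decide),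
      pvDistr 'n' "ice".toList _ "proper".toList (by decide),
      pvDistr 'b' "etter".toList _ "proper".toList (by decide),
      pvRep_match 'p' "roper".toList _ ("proper".toList ++ _) ⟨_, rfl⟩,
      show ∀ z : List Char, ("proper".toList ++ z).drop ("roper".toList.length + 1) = z from fun z => by
        rw [show ("roper".toList.length + 1) = List.length "proper".toList by decide]
        exact List.drop_left]
  apply pvDistrV4
  intro hcon
  exact hx (pvNoCreate 'g' "ood".toList _ _ (by decide) (by decide) (by decide) _
    (pvNoCreate 'n' "ice".toList _ _ (by decide) (by decide) (by decide) _
      (pvNoCreate 'b' "etter".toList _ _ (by decide) (by decide) (by decide) _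
        (pvNoCreate 'p' "roper".toList _ _ (by decide) (by decide) (by decide) _ hcon))))

lemma pvA_case5 (x : List Char) :
    pvA ("simple".toList ++ x) = "minimal, easy to understand".toList ++ pvA x := by
  unfold pvA
  rw [pvDistr 'g' "ood".toList _ "simple".toList (by decide),
      pvDistr 'n' "ice".toList _ "simple".toList (by decide),
      pvDistr 'b' "etter".toList _ "simple".toList (by decide),
      pvDistr 'p' "roper".toList _ "simple".toList (by decide),
      pvRep_match 's' "imple".toList _ ("simple".toList ++ _) ⟨_, rfl⟩,
      show ∀ z : List Char, ("simple".toList ++ z).drop ("imple".toList.length + 1) = z from fun z => by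
        rw [show ("imple".toList.length + 1) = List.length "simple".toList by decide]
        exact List.drop_left]

lemma pvA_default (c : Char) (t : List Char)
    (h1 : ¬ "good".toList <+: (c :: t)) (h2 : ¬ "nice".toList <+: (c :: t))
    (h3 : ¬ "better".toList <+: (c :: t)) (h4 : ¬ "proper".toList <+: (c :: t))
    (h5 : ¬ "simple".toList <+: (c :: t)) :
    pvA (c :: t) = c :: pvA t := by
  have h2' : ¬ "nice".toList <+:
      pvRep 'g' "ood".toList "high-quality, maintainable".toList (c :: t) := fun hcon =>
    h2 (pvNoCreate 'g' "ood".toList "high-quality, maintainable".toList "nice".toList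
      (by decide) (by decide) (by decide) _ hcon)
  have h3' : ¬ "better".toList <+:
      pvRep 'n' "ice".toList "well-structured, clean".toList
        (pvRep 'g' "ood".toList "high-quality, maintainable".toList (c :: t)) := fun hcon =>
    h3 (pvNoCreate 'g' "ood".toList "high-quality, maintainable".toList "better".toList
      (by decide) (by decide) (by decide) _
      (pvNoCreate 'n' "ice".toList "well-structured, clean".toList "better".toList
        (by decide) (by decide) (by decide) _ hcon))
  have h4' : ¬ "proper".toList <+:
      pvRep 'b' "etter".toList "more efficient, optimized".toList
        (pvRep 'n' "ice".toList "well-structured, clean".toList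
          (pvRep 'g' "ood".toList "high-quality, maintainable".toList (c :: t))) := fun hcon =>
    h4 (pvNoCreate 'g' "ood".toList "high-quality, maintainable".toList "proper".toList
      (by decide) (by decide) (by decide) _
      (pvNoCreate 'n' "ice".toList "well-structured, clean".toList "proper".toList
        (by decide) (by decide) (by decide) _
        (pvNoCreate 'b' "etter".toList "more efficient, optimized".toList "proper".toList
          (by decide) (by decide) (by decide) _ hcon)))
  have h5' : ¬ "simple".toList <+:
      pvRep 'p' "roper".toList "following best practices".toList
        (pvRep 'b' "etter".toList "more efficient, optimized".toList
          (pvRep 'n' "ice".toList "well-structured, clean".toList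
            (pvRep 'g' "ood".toList "high-quality, maintainable".toList (c :: t)))) := fun hcon =>
    h5 (pvNoCreate 'g' "ood".toList "high-quality, maintainable".toList "simple".toList
      (by decide) (by decide) (by decide) _
      (pvNoCreate 'n' "ice".toList "well-structured, clean".toList "simple".toList
        (by decide) (by decide) (by decide) _
        (pvNoCreate 'b' "etter".toList "more efficient, optimized".toList "simple".toList
          (by decide) (by decide) (by decide) _
          (pvNoCreate 'p' "roper".toList "following best practices".toList "simple".toList
            (by decide) (by decide) (by decide) _ hcon))))
  unfold pvA
  rw [pvRep_nomatch 'g' "ood".toList "high-quality, maintainable".toList c t h1] at h2' h3' h4' h5' ⊢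
  rw [pvRep_nomatch 'n' "ice".toList "well-structured, clean".toList c _ h2'] at h3' h4' h5' ⊢
  rw [pvRep_nomatch 'b' "etter".toList "more efficient, optimized".toList c _ h3'] at h4' h5' ⊢
  rw [pvRep_nomatch 'p' "roper".toList "following best practices".toList c _ h4'] at h5' ⊢
  rw [pvRep_nomatch 's' "imple".toList "minimal, easy to understand".toList c _ h5']

lemma pvScan_boolF (k : List Char) (l : List Char) (h : ¬ k <+: l) : k.isPrefixOf l = false :=
  Bool.eq_false_iff.mpr (fun hb => h (List.isPrefixOf_iff_prefix.mp hb))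

lemma pvScan_case1 (x : List Char) :
    pvAltScan ("good".toList ++ x) = "high-quality, maintainable".toList ++ pvAltScan x := by
  rw [show ("good".toList ++ x) = 'g' :: ("ood".toList ++ x) from rfl, pvAltScan]
  have hg : ("good".toList.isPrefixOf ('g' :: ("ood".toList ++ x))) = true :=
    List.isPrefixOf_iff_prefix.mpr ⟨x, rfl⟩
  simp only [pvAltTable, List.find?, hg]
  rw [show ("good".toList.length - 1) = List.length "ood".toList from by decide,
      List.drop_left]

lemma pvScan_case2 (x : List Char) :
    pvAltScan ("nice".toList ++ x) = "well-structured, clean".toList ++ pvAltScan x := by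
  rw [show ("nice".toList ++ x) = 'n' :: ("ice".toList ++ x) from rfl, pvAltScan]
  have hg : ("good".toList.isPrefixOf ('n' :: ("ice".toList ++ x))) = false := by
    simp [List.isPrefixOf]
  have hn : ("nice".toList.isPrefixOf ('n' :: ("ice".toList ++ x))) = true :=
    List.isPrefixOf_iff_prefix.mpr ⟨x, rfl⟩
  simp only [pvAltTable, List.find?, hg, hn]
  rw [show ("nice".toList.length - 1) = List.length "ice".toList from by decide,
      List.drop_left]

lemma pvScan_case3 (x : List Char) :
    pvAltScan ("better".toList ++ x) = "more efficient, optimized".toList ++ pvAltScan x := by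
  rw [show ("better".toList ++ x) = 'b' :: ("etter".toList ++ x) from rfl, pvAltScan]
  have hg : ("good".toList.isPrefixOf ('b' :: ("etter".toList ++ x))) = false := by
    simp [List.isPrefixOf]
  have hn : ("nice".toList.isPrefixOf ('b' :: ("etter".toList ++ x))) = false := by
    simp [List.isPrefixOf]
  have hb : ("better".toList.isPrefixOf ('b' :: ("etter".toList ++ x))) = true :=
    List.isPrefixOf_iff_prefix.mpr ⟨x, rfl⟩
  simp only [pvAltTable, List.find?, hg, hn, hb]
  rw [show ("better".toList.length - 1) = List.length "etter".toList from by decide,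
      List.drop_left]

lemma pvScan_case4 (x : List Char) :
    pvAltScan ("proper".toList ++ x) = "following best practices".toList ++ pvAltScan x := by
  rw [show ("proper".toList ++ x) = 'p' :: ("roper".toList ++ x) from rfl, pvAltScan]
  have hg : ("good".toList.isPrefixOf ('p' :: ("roper".toList ++ x))) = false := by
    simp [List.isPrefixOf]
  have hn : ("nice".toList.isPrefixOf ('p' :: ("roper".toList ++ x))) = false := by
    simp [List.isPrefixOf]
  have hb : ("better".toList.isPrefixOf ('p' :: ("roper".toList ++ x))) = false := by
    simp [List.isPrefixOf]
  have hp : ("proper".toList.isPrefixOf ('p' :: ("roper".toList ++ x))) = true :=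
    List.isPrefixOf_iff_prefix.mpr ⟨x, rfl⟩
  simp only [pvAltTable, List.find?, hg, hn, hb, hp]
  rw [show ("proper".toList.length - 1) = List.length "roper".toList from by decide,
      List.drop_left]

lemma pvScan_case5 (x : List Char) :
    pvAltScan ("simple".toList ++ x) = "minimal, easy to understand".toList ++ pvAltScan x := by
  rw [show ("simple".toList ++ x) = 's' :: ("imple".toList ++ x) from rfl, pvAltScan]
  have hg : ("good".toList.isPrefixOf ('s' :: ("imple".toList ++ x))) = false := by
    simp [List.isPrefixOf]
  have hn : ("nice".toList.isPrefixOf ('s' :: ("imple".toList ++ x))) = false := by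
    simp [List.isPrefixOf]
  have hb : ("better".toList.isPrefixOf ('s' :: ("imple".toList ++ x))) = false := by
    simp [List.isPrefixOf]
  have hp : ("proper".toList.isPrefixOf ('s' :: ("imple".toList ++ x))) = false := by
    simp [List.isPrefixOf]
  have hs : ("simple".toList.isPrefixOf ('s' :: ("imple".toList ++ x))) = true :=
    List.isPrefixOf_iff_prefix.mpr ⟨x, rfl⟩
  simp only [pvAltTable, List.find?, hg, hn, hb, hp, hs]
  rw [show ("simple".toList.length - 1) = List.length "imple".toList from by decide,
      List.drop_left]

lemma pvScan_default (c : Char) (t : List Char)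
    (h1 : ¬ "good".toList <+: (c :: t)) (h2 : ¬ "nice".toList <+: (c :: t))
    (h3 : ¬ "better".toList <+: (c :: t)) (h4 : ¬ "proper".toList <+: (c :: t))
    (h5 : ¬ "simple".toList <+: (c :: t)) :
    pvAltScan (c :: t) = c :: pvAltScan t := by
  rw [pvAltScan]
  simp only [pvAltTable, List.find?, pvScan_boolF _ _ h1, pvScan_boolF _ _ h2,
    pvScan_boolF _ _ h3, pvScan_boolF _ _ h4, pvScan_boolF _ _ h5]

lemma pvInfix_of_suffix {s x l : List Char} (hx : s <:+: x) (h : x <:+ l) : s <:+: l :=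
  hx.trans h.isInfix

lemma pvMain : ∀ (n : Nat) (l : List Char), l.length ≤ n →
    ¬ "properimple".toList <:+: l → pvA l = pvAltScan l := by
  intro n
  induction n with
  | zero =>
    intro l hl _
    have : l = [] := by cases l <;> simp_all
    subst this
    rw [show pvAltScan [] = [] from by rw [pvAltScan]]
    unfold pvA
    rw [pvRep, pvRep, pvRep, pvRep, pvRep]
  | succ n ih =>
    intro l hl hD
    match l with
    | [] =>
      rw [show pvAltScan [] = [] from by rw [pvAltScan]]
      unfold pvA
      rw [pvRep, pvRep, pvRep, pvRep, pvRep]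
    | c :: t =>
      by_cases h1 : "good".toList <+: (c :: t)
      · obtain ⟨x, hx⟩ := h1
        have hlen := congrArg List.length hx
        simp at hlen
        rw [← hx, pvA_case1, pvScan_case1,
            ih x (by simp at hl; omega)
              (fun hcon => hD (pvInfix_of_suffix hcon ⟨"good".toList, hx⟩))]
      · by_cases h2 : "nice".toList <+: (c :: t)
        · obtain ⟨x, hx⟩ := h2
          have hlen := congrArg List.length hx
          simp at hlen
          rw [← hx, pvA_case2, pvScan_case2,
              ih x (by simp at hl; omega)
                (fun hcon => hD (pvInfix_of_suffix hcon ⟨"nice".toList, hx⟩))]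
        · by_cases h3 : "better".toList <+: (c :: t)
          · obtain ⟨x, hx⟩ := h3
            have hlen := congrArg List.length hx
            simp at hlen
            rw [← hx, pvA_case3, pvScan_case3,
                ih x (by simp at hl; omega)
                  (fun hcon => hD (pvInfix_of_suffix hcon ⟨"better".toList, hx⟩))]
          · by_cases h4 : "proper".toList <+: (c :: t)
            · obtain ⟨x, hx⟩ := h4
              have hlen := congrArg List.length hx
              simp at hlen
              have himple : ¬ "imple".toList <+: x := by
                intro hcon
                apply hD
                obtain ⟨r, hr⟩ := hcon
                refine List.IsPrefix.isInfix ⟨r, ?_⟩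
                rw [show ("properimple".toList) = "proper".toList ++ "imple".toList from rfl,
                    List.append_assoc, hr, hx]
              rw [← hx, pvA_case4 x himple, pvScan_case4,
                  ih x (by simp at hl; omega)
                    (fun hcon => hD (pvInfix_of_suffix hcon ⟨"proper".toList, hx⟩))]
            · by_cases h5 : "simple".toList <+: (c :: t)
              · obtain ⟨x, hx⟩ := h5
                have hlen := congrArg List.length hx
                simp at hlen
                rw [← hx, pvA_case5, pvScan_case5,
                    ih x (by simp at hl; omega)
                      (fun hcon => hD (pvInfix_of_suffix hcon ⟨"simple".toList, hx⟩))]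
              · have hDt : ¬ "properimple".toList <:+: t := fun hcon =>
                  hD (pvInfix_of_suffix hcon (List.suffix_cons c t))
                rw [pvA_default c t h1 h2 h3 h4 h5, pvScan_default c t h1 h2 h3 h4 h5,
                    ih t (by simp at hl; omega) hDt]

lemma pvInfix_iff_drop {k m : List Char} : k <:+: m ↔ ∃ j, k <+: m.drop j := by
  constructor
  · rintro ⟨s, t, rfl⟩
    refine ⟨s.length, ?_⟩
    rw [List.append_assoc, List.drop_left]
    exact List.prefix_append k t
  · rintro ⟨j, h⟩
    exact h.isInfix.trans (List.drop_suffix j m).isInfix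

lemma pvPI_skip (u x : List Char)
    (hu : ∀ j < u.length, ¬ "properimple".toList <+: u.drop j ++ x)
    (h : "properimple".toList <:+: u ++ x) : "properimple".toList <:+: x := by
  obtain ⟨j, hj⟩ := pvInfix_iff_drop.mp h
  by_cases hlt : j < u.length
  · exact absurd (by rwa [List.drop_append_of_le_length (le_of_lt hlt)] at hj) (hu j hlt)
  · have : (u ++ x).drop j = x.drop (j - u.length) := by
      rw [List.drop_append, List.drop_eq_nil_of_le (by omega), List.nil_append]
    rw [this] at hj
    exact pvInfix_iff_drop.mpr ⟨j - u.length, hj⟩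

-- inside a key block no occurrence of "properimple" can start (except handled separately)
lemma pvPI_skip_key (u x : List Char)
    (hk : ∀ j < u.length, ¬ "properimple".toList <+: u.drop j ∧ ¬ u.drop j <+: "properimple".toList)
    (h : "properimple".toList <:+: u ++ x) : "properimple".toList <:+: x := by
  refine pvPI_skip u x (fun j hj hcon => ?_) h
  rcases pv_prefix_append_cases hcon with hA | hB
  · exact (hk j hj).1 hA
  · exact (hk j hj).2 hB

lemma pvTight : ∀ (n : Nat) (l : List Char), l.length ≤ n →
    "properimple".toList <:+: l → pvA l ≠ pvAltScan l := by
  intro n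
  induction n with
  | zero =>
    intro l hl hPI
    have : l = [] := by cases l <;> simp_all
    subst this
    exact absurd (List.eq_nil_of_infix_nil hPI) (by decide)
  | succ n ih =>
    intro l hl hPI
    match l with
    | [] => exact absurd (List.eq_nil_of_infix_nil hPI) (by decide)
    | c :: t =>
      by_cases h1 : "good".toList <+: (c :: t)
      · obtain ⟨x, hx⟩ := h1
        have hlen := congrArg List.length hx
        simp at hlen
        rw [← hx, pvA_case1, pvScan_case1]
        have hPIx : "properimple".toList <:+: x :=
          pvPI_skip_key "good".toList x (by decide) (hx ▸ hPI)
        intro heq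
        exact ih x (by simp at hl; omega) hPIx (List.append_cancel_left heq)
      · by_cases h2 : "nice".toList <+: (c :: t)
        · obtain ⟨x, hx⟩ := h2
          have hlen := congrArg List.length hx
          simp at hlen
          rw [← hx, pvA_case2, pvScan_case2]
          have hPIx : "properimple".toList <:+: x :=
            pvPI_skip_key "nice".toList x (by decide) (hx ▸ hPI)
          intro heq
          exact ih x (by simp at hl; omega) hPIx (List.append_cancel_left heq)
        · by_cases h3 : "better".toList <+: (c :: t)
          · obtain ⟨x, hx⟩ := h3
            have hlen := congrArg List.length hx
            simp at hlen
            rw [← hx, pvA_case3, pvScan_case3]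
            have hPIx : "properimple".toList <:+: x :=
              pvPI_skip_key "better".toList x (by decide) (hx ▸ hPI)
            intro heq
            exact ih x (by simp at hl; omega) hPIx (List.append_cancel_left heq)
          · by_cases h4 : "proper".toList <+: (c :: t)
            · obtain ⟨x, hx⟩ := h4
              by_cases himple : "imple".toList <+: x
              · -- the cascade: A and B differ right here
                obtain ⟨r, hr⟩ := himple
                rw [← hx, ← hr, pvScan_case4]
                unfold pvA
                rw [pvDistr 'g' "ood".toList _ "proper".toList (by decide),
                    pvDistr 'n' "ice".toList _ "proper".toList (by decide),
                    pvDistr 'b' "etter".toList _ "proper".toList (by decide),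
                    pvRep_match 'p' "roper".toList _ ("proper".toList ++ _) ⟨_, rfl⟩,
                    show ∀ z : List Char, ("proper".toList ++ z).drop ("roper".toList.length + 1) = z from fun z => by
                      rw [show ("roper".toList.length + 1) = List.length "proper".toList by decide]
                      exact List.drop_left,
                    pvDistr 'g' "ood".toList _ "imple".toList (by decide),
                    pvDistr 'n' "ice".toList _ "imple".toList (by decide),
                    pvDistr 'b' "etter".toList _ "imple".toList (by decide),
                    pvDistr 'p' "roper".toList _ "imple".toList (by decide)]
                rw [show ∀ (W : List Char),
                      "following best practices".toList ++ ("imple".toList ++ W)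
                        = "following best practice".toList ++ ("simple".toList ++ W) from fun W => by
                      rw [← List.append_assoc, ← List.append_assoc,
                          show "following best practices".toList ++ "imple".toList
                            = "following best practice".toList ++ "simple".toList from by decide]]
                rw [pvDistr2 's' "imple".toList _ "following best practice".toList _ (by
                      intro j hj hcon
                      rcases pv_prefix_append_cases hcon with hA | hB
                      · exact (by decide : ∀ j < ("following best practice".toList).length,
                          ¬ ('s' :: "imple".toList) <+: ("following best practice".toList).drop j) j hj hA
                      · exact (by decide : ∀ j < ("following best practice".toList).length,
                          ¬ ("following best practice".toList).drop j <+: ('s' :: "imple".toList)) j hj hB),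
                    pvRep_match 's' "imple".toList _ ("simple".toList ++ _) ⟨_, rfl⟩,
                    show ∀ z : List Char, ("simple".toList ++ z).drop ("imple".toList.length + 1) = z from fun z => by
                      rw [show ("imple".toList.length + 1) = List.length "simple".toList by decide]
                      exact List.drop_left]
                rw [show ("following best practices".toList) = "following best practice".toList ++ ['s'] from by decide,
                    List.append_assoc]
                intro heq
                have h0 := List.append_cancel_left heq
                rw [show ("minimal, easy to understand".toList) = 'm' :: "inimal, easy to understand".toList from rfl,
                    List.cons_append, show (['s'] : List Char) ++ pvAltScan ("imple".toList ++ r) = 's' :: pvAltScan ("imple".toList ++ r) from rfl] at h0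
                simp at h0
              · -- no cascade at this occurrence: it lies further right
                have hlen := congrArg List.length hx
                simp at hlen
                rw [← hx, pvA_case4 x himple, pvScan_case4]
                have hPIx : "properimple".toList <:+: x := by
                  refine pvPI_skip "proper".toList x (fun j hj hcon => ?_) (hx ▸ hPI)
                  match j with
                  | 0 =>
                    rw [show ("proper".toList).drop 0 = "proper".toList from rfl,
                        show ("properimple".toList) = "proper".toList ++ "imple".toList from rfl] at hcon
                    exact himple ((List.prefix_append_right_inj _).mp hcon)
                  | j + 1 =>
                    rcases pv_prefix_append_cases hcon with hA | hB
                    · exact (by decide : ∀ i < ("proper".toList).length, 1 ≤ i →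
                        ¬ "properimple".toList <+: ("proper".toList).drop i) (j + 1) hj (by omega) hA
                    · exact (by decide : ∀ i < ("proper".toList).length, 1 ≤ i →
                        ¬ ("proper".toList).drop i <+: "properimple".toList) (j + 1) hj (by omega) hB
                intro heq
                exact ih x (by simp at hl; omega) hPIx (List.append_cancel_left heq)
            · by_cases h5 : "simple".toList <+: (c :: t)
              · obtain ⟨x, hx⟩ := h5
                have hlen := congrArg List.length hx
                simp at hlen
                rw [← hx, pvA_case5, pvScan_case5]
                have hPIx : "properimple".toList <:+: x :=
                  pvPI_skip_key "simple".toList x (by decide) (hx ▸ hPI)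
                intro heq
                exact ih x (by simp at hl; omega) hPIx (List.append_cancel_left heq)
              · rw [pvA_default c t h1 h2 h3 h4 h5, pvScan_default c t h1 h2 h3 h4 h5]
                have hPIt : "properimple".toList <:+: t := by
                  rcases List.infix_cons_iff.mp hPI with hp | hi
                  · exact absurd ((by decide : "proper".toList <+: "properimple".toList).trans hp) h4
                  · exact hi
                intro heq
                exact ih t (by simp at hl; omega) hPIt (List.cons_injective heq)

-- ===== VERDICT (by name: the statement is the Claim_ definition above) =====
theorem add_specificity_py_spec : Claim_unchanged_add_specificity_py := by
  intro prompt _ hD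
  unfold add_specificity_py add_specificity_py_alt
  apply String.toList_inj.mp
  simp only [List.foldl, PySem.Str.toList_replace, String.toList_ofList]
  rw [show ("good".toList) = 'g' :: "ood".toList from rfl,
      show ("nice".toList) = 'n' :: "ice".toList from rfl,
      show ("better".toList) = 'b' :: "etter".toList from rfl,
      show ("proper".toList) = 'p' :: "roper".toList from rfl,
      show ("simple".toList) = 's' :: "imple".toList from rfl,
      pv_replace_eq, pv_replace_eq, pv_replace_eq, pv_replace_eq, pv_replace_eq]
  exact pvMain prompt.toList.length prompt.toList le_rfl
    (fun hcon => hD ((PySem.Str.isIn_iff_infix _ _).mpr hcon))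

theorem add_specificity_py_tight : Claim_exact_add_specificity_py := by
  intro prompt _ hD heq
  have hPI : "properimple".toList <:+: prompt.toList := (PySem.Str.isIn_iff_infix _ _).mp hD
  apply pvTight prompt.toList.length prompt.toList le_rfl hPI
  have := congrArg String.toList heq
  unfold add_specificity_py add_specificity_py_alt at this
  simp only [List.foldl, PySem.Str.toList_replace, String.toList_ofList] at this
  rw [show ("good".toList) = 'g' :: "ood".toList from rfl,
      show ("nice".toList) = 'n' :: "ice".toList from rfl,
      show ("better".toList) = 'b' :: "etter".toList from rfl,
      show ("proper".toList) = 'p' :: "roper".toList from rfl,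
      show ("simple".toList) = 's' :: "imple".toList from rfl,
      pv_replace_eq, pv_replace_eq, pv_replace_eq, pv_replace_eq, pv_replace_eq] at this
  exact this

theorem add_specificity_py_changed : Claim_changed_add_specificity_py := by
  unfold Claim_changed_add_specificity_py
  refine ⟨by decide, by decide, ?_, ?_, by decide⟩
  · apply String.toList_inj.mp
    unfold add_specificity_py pvDiffWitness_add_specificity_py pvDiffWitnessOut_add_specificity_py
    simp only [List.foldl, PySem.Str.toList_replace]
    decide
  · apply String.toList_inj.mp
    unfold add_specificity_py_alt pvDiffWitness_add_specificity_py pvDiffWitnessOut_add_specificity_py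
    simp only [String.toList_ofList]
    rw [show ("properimple".toList) = "proper".toList ++ "imple".toList from rfl, pvScan_case4]
    rw [show ("imple".toList) = 'i' :: "mple".toList from rfl,
        pvScan_default _ _ (by decide) (by decide) (by decide) (by decide) (by decide),
        show ("mple".toList) = 'm' :: "ple".toList from rfl,
        pvScan_default _ _ (by decide) (by decide) (by decide) (by decide) (by decide),
        show ("ple".toList) = 'p' :: "le".toList from rfl,
        pvScan_default _ _ (by decide) (by decide) (by decide) (by decide) (by decide),
        show ("le".toList) = 'l' :: "e".toList from rfl,
        pvScan_default _ _ (by decide) (by decide) (by decide) (by decide) (by decide),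
        show ("e".toList) = 'e' :: ([] : List Char) from rfl,
        pvScan_default _ _ (by decide) (by decide) (by decide) (by decide) (by decide),
        show pvAltScan [] = [] from by rw [pvAltScan]]
    decide
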